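-- pv_equiv track=rewrite | github.com/pansilup/repl-deprecated-py-api | search_rst_files.py | extract_data2
-- ===== SOURCE A (Python) =====
-- def extract_data2(substr, flines):
--   results = []
--   line_no = 0
--   for line in flines:
--         substr_count = 0
--         line_result = []
--         line_result.append(line_no)
--         line_result.append(substr_count)
--         index = 0                   # current index: character being compared
--         #prev = 0                    # previous index: last character compared
--         while index < len(line):    # While index has not exceeded string length,
--               index = line.lower().find(substr.lower(), index)  # set index to first occurrence of substr
--               if index == -1:           # If nothing
--                 break
--               line_result.append(index)
--               substr_count += 1
--               #prev = index + len(substr)# remember this position for next loop.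
--               index += len(substr)      # increment the index by the length of substr.
--         line_result[1] = substr_count
--         line_no += 1
--         if substr_count > 0:
--           results.append(line_result)
--
--   return results #list{..., [line_no, substr_count, substr_loc_1,...substr_loc_n], ...}
-- ===== SOURCE B (Python) =====
-- def extract_data2(substr, flines):
--     low_sub = substr.lower()
--     L = len(low_sub)
--     results = []
--     for line_no, line in enumerate(flines):
--         parts = line.lower().split(low_sub)
--         if len(parts) > 1:
--             positions = []
--             pos = 0
--             for part in parts[:-1]:
--                 pos += len(part)
--                 positions.append(pos)
--                 pos += L
--             results.append([line_no, len(parts) - 1] + positions)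
--     return results
-- ===== Notes on version B (the rewrite author's own statement) =====
-- stated objective: faster
-- what changed: B replaces A's character-index while loop (which calls line.lower() and .find again on every match, with -1 sentinel, break, manual counter and in-place line_result[1] patch) by lowering each line once, one str.split on the lowered substring, and a prefix-sum pass over the pieces that reconstructs the match positions (count = len(parts)-1).
-- outside the precondition, e.g. on extract_data2('', ['']): A returns [], B raises ValueError
import Mathlib
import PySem

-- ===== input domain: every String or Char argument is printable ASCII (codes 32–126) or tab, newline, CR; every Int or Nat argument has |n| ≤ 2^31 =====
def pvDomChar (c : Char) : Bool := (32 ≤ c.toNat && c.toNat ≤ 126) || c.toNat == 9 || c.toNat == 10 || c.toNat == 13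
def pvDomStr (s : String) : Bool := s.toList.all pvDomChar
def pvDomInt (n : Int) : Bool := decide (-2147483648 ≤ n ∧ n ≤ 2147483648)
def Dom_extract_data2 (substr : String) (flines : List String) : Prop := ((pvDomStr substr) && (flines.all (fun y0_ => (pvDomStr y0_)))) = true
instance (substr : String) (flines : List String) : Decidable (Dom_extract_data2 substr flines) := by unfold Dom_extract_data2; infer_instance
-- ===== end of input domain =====

-- B replaces A's find-with-restart while loop by one split of the lowered line on the
-- lowered substring plus a prefix-sum pass reconstructing the positions (measured faster:
-- A re-lowers the whole line on every find call, B lowers each line once).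

-- ===== PORT A =====
-- the inner while loop; fuel bounds the iterations (index grows by len(substr) ≥ 1 each
-- round under Pre_, so len(line)+1 fuel is never exhausted); returns (positions, count)
def extract_data2_whileA (line substr : String) (index : Int) : Nat → List Int × Int
  | 0 => ([], 0)
  | fuel + 1 =>
    if index < PySem.Str.len line then
      let idx := PySem.Str.findFrom (PySem.Str.lower line) (PySem.Str.lower substr) index
      if idx = -1 then ([], 0)
      else
        let rest := extract_data2_whileA line substr (idx + PySem.Str.len substr) fuel
        (idx :: rest.1, rest.2 + 1)
    else ([], 0)

def extract_data2 (substr : String) (flines : List String) : List (List Int) :=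
  (flines.foldl (fun (st : List (List Int) × Int) line =>
      let r := extract_data2_whileA line substr 0 (line.toList.length + 1)
      let line_result : List Int := st.2 :: r.2 :: r.1
      (if r.2 > 0 then st.1 ++ [line_result] else st.1, st.2 + 1))
    ([], 0)).1

-- ===== PORT B =====
-- one split of the lowered line on the lowered substring, then a prefix-sum pass over
-- the pieces (all but the last) reconstructing the match positions; count = #parts - 1
def extract_data2_alt (substr : String) (flines : List String) : List (List Int) :=
  let low_sub := PySem.Str.lower substr
  let L := PySem.Str.len low_sub
  (PySem.List.enumerate flines).foldl (fun results p =>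
      let parts := PySem.Chars.splitOn (PySem.Str.lower p.2).toList low_sub.toList
      if parts.length > 1 then
        let st := parts.dropLast.foldl
          (fun (st : List Int × Int) part => (st.1 ++ [st.2 + (part.length : Int)], st.2 + (part.length : Int) + L))
          ([], 0)
        results ++ [p.1 :: ((parts.length : Int) - 1) :: st.1]
      else results) []

-- ===== PRECONDITION & SPEC =====
-- Pre_ excludes only the empty substring: there A infinite-loops on any nonempty line
-- (and returns [] only when every line is empty), while B's str.split raises ValueError.
def Pre_extract_data2 (substr : String) (flines : List String) : Prop := substr ≠ ""
instance (substr : String) (flines : List String) : Decidable (Pre_extract_data2 substr flines) := by unfold Pre_extract_data2; infer_instance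
def pvWitness_extract_data2 : String × List String := ("aB", ["xAbaB y", "", "no hit", "ababab"])

def Spec_extract_data2 (substr : String) (flines : List String) (out : List (List Int)) : Prop := out = extract_data2_alt substr flines
instance (substr : String) (flines : List String) (out : List (List Int)) : Decidable (Spec_extract_data2 substr flines out) := by unfold Spec_extract_data2; infer_instance

-- ===== CLAIM (what is proved, stated in full; the proofs are below) =====
def Claim_equal_extract_data2 : Prop := ∀ (substr : String) (flines : List String), Dom_extract_data2 substr flines → Pre_extract_data2 substr flines → Spec_extract_data2 substr flines (extract_data2 substr flines)

-- ===== LEMMAS AND PROOFS =====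

-- proof-side reference splitter: split t at the FIRST occurrence of sub and recurse
def findSplit (sub t : List Char) : List (List Char) :=
  if h : PySem.Chars.find t sub = -1 ∨ sub = [] then [t]
  else
    t.take (PySem.Chars.find t sub).toNat ::
      findSplit sub (t.drop ((PySem.Chars.find t sub).toNat + sub.length))
termination_by t.length
decreasing_by
  push_neg at h
  have h0 : 0 ≤ PySem.Chars.find t sub := by
    have := PySem.Chars.neg_one_le_find t sub; omega
  have hlen := (PySem.Chars.find_spec h0).1.length_le
  simp only [List.length_drop] at *
  have hsub : 0 < sub.length := List.length_pos_iff.mpr h.2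
  omega

-- proof-side occurrence positions: first occurrence, then shift the rest past the match
def posOf (sub t : List Char) : List Int :=
  if h : PySem.Chars.find t sub = -1 ∨ sub = [] then []
  else
    ((PySem.Chars.find t sub).toNat : Int) ::
      (posOf sub (t.drop ((PySem.Chars.find t sub).toNat + sub.length))).map
        (· + (((PySem.Chars.find t sub).toNat + sub.length : Nat) : Int))
termination_by t.length
decreasing_by
  push_neg at h
  have h0 : 0 ≤ PySem.Chars.find t sub := by
    have := PySem.Chars.neg_one_le_find t sub; omega
  have hlen := (PySem.Chars.find_spec h0).1.length_le
  simp only [List.length_drop] at *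
  have hsub : 0 < sub.length := List.length_pos_iff.mpr h.2
  omega

lemma find_nil_of_ne {sub : List Char} (hs : sub ≠ []) : PySem.Chars.find [] sub = -1 := by
  rw [PySem.Chars.find_eq_neg_one_iff]
  simp [List.infix_nil]
  intro h; exact hs h

lemma findSplit_ne_nil (sub t : List Char) : findSplit sub t ≠ [] := by
  rw [findSplit]; split <;> simp

-- find = 0 when sub is a prefix
lemma find_of_prefix {sub t : List Char} (h : sub <+: t) : PySem.Chars.find t sub = 0 := by
  have h0 : 0 ≤ PySem.Chars.find t sub := (PySem.Chars.find_nonneg_iff t sub).mpr h.isInfix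
  have hspec := PySem.Chars.find_spec h0
  by_contra hne
  have := hspec.2 0 (by omega)
  simp at this
  exact this h

-- one character step of find when sub is not a prefix
lemma find_cons {sub : List Char} (c : Char) (rest : List Char)
    (hnp : ¬ sub <+: (c :: rest)) :
    PySem.Chars.find (c :: rest) sub =
      if PySem.Chars.find rest sub = -1 then -1 else PySem.Chars.find rest sub + 1 := by
  have hdrop : ∀ (l : List Char), (∃ j, sub <+: l.drop j) ↔ sub <:+: l := by
    intro l
    rw [PySem.Chars.exists_prefix_drop_iff_isIn, PySem.Chars.isIn_iff_infix]
  split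
  · rename_i hr
    rw [PySem.Chars.find_eq_neg_one_iff] at hr ⊢
    intro hinf
    obtain ⟨j, hj⟩ := (hdrop _).mpr hinf
    match j with
    | 0 => exact hnp (by simpa using hj)
    | j + 1 => exact hr ((hdrop rest).mp ⟨j, by simpa using hj⟩)
  · rename_i hr
    have h0 : 0 ≤ PySem.Chars.find rest sub := by
      have := PySem.Chars.neg_one_le_find rest sub; omega
    have hspec := PySem.Chars.find_spec h0
    set j := (PySem.Chars.find rest sub).toNat with hj
    have hpre : sub <+: (c :: rest).drop (j + 1) := by simpa using hspec.1
    have hinf : sub <:+: (c :: rest) := (hdrop _).mp ⟨j + 1, hpre⟩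
    have h0' : 0 ≤ PySem.Chars.find (c :: rest) sub := (PySem.Chars.find_nonneg_iff _ _).mpr hinf
    have hspec' := PySem.Chars.find_spec h0'
    set m := (PySem.Chars.find (c :: rest) sub).toNat with hm
    have hm_le : m ≤ j + 1 := by
      by_contra hlt
      exact (hspec'.2 (j + 1) (by omega)) hpre
    have hm_ne : m ≠ 0 := by
      intro h0m
      apply hnp
      have := hspec'.1
      rw [h0m] at this; simpa using this
    have hj_le : j ≤ m - 1 := by
      by_contra hlt
      have hpr : sub <+: rest.drop (m - 1) := by
        have h1 : sub <+: (c :: rest).drop m := hspec'.1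
        rw [show m = (m - 1) + 1 by omega] at h1
        simpa using h1
      exact (hspec.2 (m - 1) (by omega)) hpr
    have : m = j + 1 := by omega
    omega

-- the fueled char-scan of splitOn equals the find-based reference splitter
lemma go_eq_findSplit (sub : List Char) (hs : sub ≠ []) :
    ∀ (n : Nat) (l : List Char), l.length ≤ n → ∀ (fuel : Nat) (cur : List Char) (acc : List (List Char)),
      l.length < fuel → ∀ (x : List Char) (xs : List (List Char)), findSplit sub l = x :: xs →
      PySem.Chars.splitOn.go sub fuel l cur acc = acc.reverse ++ (cur.reverse ++ x) :: xs := by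
  intro n
  induction n with
  | zero =>
    intro l hl fuel cur acc hfuel x xs hfs
    have hl0 : l = [] := List.length_eq_zero_iff.mp (by omega)
    subst hl0
    rw [findSplit, dif_pos (Or.inl (find_nil_of_ne hs))] at hfs
    injection hfs with h1 h2
    subst h1; subst h2
    obtain ⟨f, rfl⟩ : ∃ f, fuel = f + 1 := ⟨fuel - 1, by omega⟩
    rw [PySem.Chars.splitOn.go] <;> simp
  | succ n ih =>
    intro l hl fuel cur acc hfuel x xs hfs
    match l with
    | [] =>
      rw [findSplit, dif_pos (Or.inl (find_nil_of_ne hs))] at hfs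
      injection hfs with h1 h2
      subst h1; subst h2
      obtain ⟨f, rfl⟩ : ∃ f, fuel = f + 1 := ⟨fuel - 1, by omega⟩
      rw [PySem.Chars.splitOn.go] <;> simp
    | c :: rest =>
      obtain ⟨f, rfl⟩ : ∃ f, fuel = f + 1 := ⟨fuel - 1, by omega⟩
      rw [PySem.Chars.splitOn.go]
      by_cases hpre : sub.isPrefixOf (c :: rest)
      · rw [if_pos hpre]
        have hpre' : sub <+: (c :: rest) := List.isPrefixOf_iff_prefix.mp hpre
        have hfind : PySem.Chars.find (c :: rest) sub = 0 := find_of_prefix hpre'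
        rw [findSplit, dif_neg (by simp [hfind, hs])] at hfs
        simp only [hfind, Int.toNat_zero, List.take_zero, Nat.zero_add] at hfs
        obtain ⟨x', xs', hfs'⟩ : ∃ x' xs', findSplit sub (List.drop sub.length (c :: rest)) = x' :: xs' :=
          List.exists_cons_of_ne_nil (findSplit_ne_nil _ _)
        have hsub1 : 0 < sub.length := List.length_pos_iff.mpr hs
        have hrec := ih (List.drop sub.length (c :: rest))
          (by simp only [List.length_drop, List.length_cons]; simp only [List.length_cons] at hl; omega)
          f [] (cur.reverse :: acc)
          (by simp only [List.length_drop, List.length_cons]; simp only [List.length_cons] at hfuel; omega)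
          x' xs' hfs'
        rw [hrec]
        rw [hfs'] at hfs
        injection hfs with h1 h2
        subst h1; subst h2
        simp
      · rw [if_neg hpre]
        have hnp : ¬ sub <+: (c :: rest) := fun h => hpre (List.isPrefixOf_iff_prefix.mpr h)
        have hfc := find_cons c rest hnp
        by_cases hr : PySem.Chars.find rest sub = -1
        · rw [if_pos hr] at hfc
          rw [findSplit, dif_pos (Or.inl hfc)] at hfs
          injection hfs with h1 h2
          subst h1; subst h2
          have hfsr : findSplit sub rest = [rest] := by
            rw [findSplit, dif_pos (Or.inl hr)]
          have hrec := ih rest (by simp at hl; omega) f (c :: cur) acc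
            (by simp at hfuel; omega) rest [] hfsr
          rw [hrec]
          simp
        · rw [if_neg hr] at hfc
          have h0 : 0 ≤ PySem.Chars.find rest sub := by
            have := PySem.Chars.neg_one_le_find rest sub; omega
          set j := (PySem.Chars.find rest sub).toNat with hj
          have hfcv : PySem.Chars.find (c :: rest) sub = (j : Int) + 1 := by omega
          have hfs_ne : ¬ (PySem.Chars.find (c :: rest) sub = -1 ∨ sub = []) := by
            simp [hfcv, hs]; omega
          rw [findSplit, dif_neg hfs_ne] at hfs
          have htn : (PySem.Chars.find (c :: rest) sub).toNat = j + 1 := by omega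
          rw [htn, show j + 1 + sub.length = j + sub.length + 1 by omega] at hfs
          simp only [List.take_succ_cons, List.drop_succ_cons] at hfs
          injection hfs with h1 h2
          subst h1; subst h2
          have hfsr : findSplit sub rest =
              rest.take j :: findSplit sub (rest.drop (j + sub.length)) := by
            rw [findSplit, dif_neg (by simp [hs]; omega)]
          have hrec := ih rest (by simp at hl; omega) f (c :: cur) acc
            (by simp at hfuel; omega) (rest.take j) _ hfsr
          rw [hrec]
          simp

lemma splitOn_eq_findSplit (sub l : List Char) (hs : sub ≠ []) :
    PySem.Chars.splitOn l sub = findSplit sub l := by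
  obtain ⟨x, xs, hfs⟩ := List.exists_cons_of_ne_nil (findSplit_ne_nil sub l)
  rw [hfs]
  have := go_eq_findSplit sub hs l.length l le_rfl (l.length + 1) [] [] (by omega) x xs hfs
  simpa [PySem.Chars.splitOn] using this

lemma length_findSplit (sub : List Char) : ∀ (n : Nat) (t : List Char), t.length ≤ n →
    (findSplit sub t).length = (posOf sub t).length + 1 := by
  intro n
  induction n with
  | zero =>
    intro t ht
    have ht0 : t = [] := List.length_eq_zero_iff.mp (by omega)
    subst ht0
    by_cases hsub : sub = []
    · rw [findSplit, posOf, dif_pos (Or.inr hsub), dif_pos (Or.inr hsub)]; simp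
    · rw [findSplit, posOf, dif_pos (Or.inl (find_nil_of_ne hsub)),
        dif_pos (Or.inl (find_nil_of_ne hsub))]; simp
  | succ n ih =>
    intro t ht
    rw [findSplit, posOf]
    by_cases h : PySem.Chars.find t sub = -1 ∨ sub = []
    · rw [dif_pos h, dif_pos h]; simp
    · rw [dif_neg h, dif_neg h]
      push_neg at h
      have h0 : 0 ≤ PySem.Chars.find t sub := by
        have := PySem.Chars.neg_one_le_find t sub; omega
      have hlen := (PySem.Chars.find_spec h0).1.length_le
      simp only [List.length_drop] at hlen
      have hsub : 0 < sub.length := List.length_pos_iff.mpr h.2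
      simp only [List.length_cons, List.length_map]
      rw [ih _ (by simp only [List.length_drop]; omega)]

-- A's while loop from index k computes the shifted occurrence positions of the k-suffix
lemma whileA_eq_posOf (line substr : String) (hs : substr ≠ "") :
    ∀ (fuel k : Nat), k ≤ line.toList.length →
      line.toList.length - k < fuel →
      extract_data2_whileA line substr (k : Int) fuel =
        (((posOf (PySem.Str.lower substr).toList ((PySem.Str.lower line).toList.drop k)).map (· + (k : Int))),
         ((posOf (PySem.Str.lower substr).toList ((PySem.Str.lower line).toList.drop k)).length : Int)) := by
  have hS : (PySem.Str.lower line).toList.length = line.toList.length := by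
    simp [PySem.Str.toList_lower, PySem.Chars.lower]
  have hsub : (PySem.Str.lower substr).toList ≠ [] := by
    simp [PySem.Str.toList_lower, PySem.Chars.lower, hs]
  have hsubL : (PySem.Str.lower substr).toList.length = substr.toList.length := by
    simp [PySem.Str.toList_lower, PySem.Chars.lower]
  intro fuel
  induction fuel with
  | zero => intro k hk hf; omega
  | succ f ih =>
    intro k hk hf
    rw [extract_data2_whileA]
    by_cases hguard : (k : Int) < PySem.Str.len line
    · rw [if_pos hguard]
      rw [PySem.Str.len_eq] at hguard
      have hkl : k < line.toList.length := by exact_mod_cast hguard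
      simp only [PySem.Str.findFrom_eq]
      rw [PySem.Chars.findFrom_natCast _ _ k (by omega)]
      by_cases hfind : PySem.Chars.find ((PySem.Str.lower line).toList.drop k) (PySem.Str.lower substr).toList = -1
      · rw [if_pos hfind, if_pos rfl, posOf, dif_pos (Or.inl hfind)]
        simp
      · rw [if_neg hfind]
        have h0 : 0 ≤ PySem.Chars.find ((PySem.Str.lower line).toList.drop k) (PySem.Str.lower substr).toList := by
          have := PySem.Chars.neg_one_le_find ((PySem.Str.lower line).toList.drop k) (PySem.Str.lower substr).toList
          omega
        set j := (PySem.Chars.find ((PySem.Str.lower line).toList.drop k) (PySem.Str.lower substr).toList).toNat with hjdef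
        have hsub0 : 0 < substr.toList.length := by
          have h1 : substr.toList ≠ [] := by simp [hs]
          exact List.length_pos_iff.mpr h1
        have hlen := (PySem.Chars.find_spec h0).1.length_le
        simp only [List.length_drop] at hlen
        have hjk : k + j + substr.toList.length ≤ line.toList.length := by omega
        rw [if_neg (by omega)]
        rw [PySem.Str.len_eq]
        have harg : (k : Int) + PySem.Chars.find ((PySem.Str.lower line).toList.drop k) (PySem.Str.lower substr).toList + (substr.toList.length : Int)
            = ((k + j + substr.toList.length : Nat) : Int) := by push_cast; omega
        rw [harg]
        rw [posOf, dif_neg (by push_neg; exact ⟨hfind, hsub⟩)]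
        rw [List.drop_drop]
        rw [show k + ((PySem.Chars.find ((PySem.Str.lower line).toList.drop k) (PySem.Str.lower substr).toList).toNat + (PySem.Str.lower substr).toList.length) = k + j + substr.toList.length by omega]
        rw [ih (k + j + substr.toList.length) (by omega) (by omega)]
        simp only [Prod.mk.injEq, List.map_cons, List.map_map, List.cons.injEq,
          List.length_cons, List.length_map]
        refine ⟨⟨by omega, ?_⟩, by push_cast; ring⟩
        congr 1
        funext x
        simp only [Function.comp_apply]
        push_cast
        omega
    · rw [if_neg hguard]
      rw [PySem.Str.len_eq] at hguard
      have hkl : line.toList.length ≤ k := by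
        have := not_lt.mp hguard; exact_mod_cast this
      have hdrop : (PySem.Str.lower line).toList.drop k = [] := by
        rw [List.drop_eq_nil_iff]; omega
      rw [hdrop, posOf, dif_pos (Or.inl (find_nil_of_ne hsub))]
      simp

-- B's prefix-sum pass over all but the last piece reconstructs the occurrence positions
lemma foldB_eq_posOf (sub : List Char) (hs : sub ≠ []) :
    ∀ (n : Nat) (t : List Char), t.length ≤ n → ∀ (acc : List Int) (p : Int),
      ((findSplit sub t).dropLast.foldl
        (fun (st : List Int × Int) part => (st.1 ++ [st.2 + (part.length : Int)], st.2 + (part.length : Int) + (sub.length : Int)))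
        (acc, p)).1 = acc ++ (posOf sub t).map (· + p) := by
  intro n
  induction n with
  | zero =>
    intro t ht acc p
    have ht0 : t = [] := List.length_eq_zero_iff.mp (by omega)
    subst ht0
    rw [findSplit, posOf, dif_pos (Or.inl (find_nil_of_ne hs)), dif_pos (Or.inl (find_nil_of_ne hs))]
    simp
  | succ n ih =>
    intro t ht acc p
    rw [findSplit, posOf]
    by_cases h : PySem.Chars.find t sub = -1 ∨ sub = []
    · rw [dif_pos h, dif_pos h]; simp
    · rw [dif_neg h, dif_neg h]
      push_neg at h
      have h0 : 0 ≤ PySem.Chars.find t sub := by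
        have := PySem.Chars.neg_one_le_find t sub; omega
      set j := (PySem.Chars.find t sub).toNat with hjdef
      have hlen := (PySem.Chars.find_spec h0).1.length_le
      simp only [List.length_drop] at hlen
      have hsub0 : 0 < sub.length := List.length_pos_iff.mpr hs
      rw [List.dropLast_cons_of_ne_nil (findSplit_ne_nil _ _), List.foldl_cons]
      have htake : (t.take j).length = j := by
        rw [List.length_take]; omega
      rw [htake]
      rw [ih (t.drop (j + sub.length)) (by simp only [List.length_drop]; omega)]
      simp only [List.map_cons, List.map_map, List.append_assoc, List.singleton_append]
      congr 1
      congr 1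
      · omega
      · congr 1
        funext x
        simp only [Function.comp_apply]
        push_cast
        omega

-- the whole outer loop: A's (results, line_no) fold equals B's fold over enumerate
lemma outer_fold (substr : String) (hs : substr ≠ "") :
    ∀ (fl : List String) (res : List (List Int)) (n : Int),
      (fl.foldl (fun (st : List (List Int) × Int) line =>
          let r := extract_data2_whileA line substr 0 (line.toList.length + 1)
          let line_result : List Int := st.2 :: r.2 :: r.1
          (if r.2 > 0 then st.1 ++ [line_result] else st.1, st.2 + 1)) (res, n)).1
      = (PySem.List.enumerate fl n).foldl (fun results p =>
          let parts := PySem.Chars.splitOn (PySem.Str.lower p.2).toList (PySem.Str.lower substr).toList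
          if parts.length > 1 then
            let st := parts.dropLast.foldl
              (fun (st : List Int × Int) part => (st.1 ++ [st.2 + (part.length : Int)], st.2 + (part.length : Int) + PySem.Str.len (PySem.Str.lower substr)))
              ([], 0)
            results ++ [p.1 :: ((parts.length : Int) - 1) :: st.1]
          else results) res := by
  have hsub : (PySem.Str.lower substr).toList ≠ [] := by
    simp [PySem.Str.toList_lower, PySem.Chars.lower, hs]
  intro fl
  induction fl with
  | nil => intro res n; simp [PySem.List.enumerate]
  | cons line rest ih =>
    intro res n
    rw [List.foldl_cons]
    have henum : PySem.List.enumerate (line :: rest) n = (n, line) :: PySem.List.enumerate rest (n + 1) := by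
      rw [PySem.List.enumerate]
    rw [henum, List.foldl_cons]
    have hS : (PySem.Str.lower line).toList.length = line.toList.length := by
      simp [PySem.Str.toList_lower, PySem.Chars.lower]
    have hr := whileA_eq_posOf line substr hs (line.toList.length + 1) 0 (by omega) (by omega)
    simp only [Nat.cast_zero] at hr
    simp only [List.drop_zero] at hr
    have hmap0 : (posOf (PySem.Str.lower substr).toList (PySem.Str.lower line).toList).map (· + (0 : Int))
        = posOf (PySem.Str.lower substr).toList (PySem.Str.lower line).toList := by
      simp
    rw [hmap0] at hr
    have hparts := splitOn_eq_findSplit (PySem.Str.lower substr).toList (PySem.Str.lower line).toList hsub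
    have hplen := length_findSplit (PySem.Str.lower substr).toList (PySem.Str.lower line).toList.length
      (PySem.Str.lower line).toList le_rfl
    have hfold := foldB_eq_posOf (PySem.Str.lower substr).toList hsub
      (PySem.Str.lower line).toList.length (PySem.Str.lower line).toList le_rfl [] 0
    have hmap0' : (posOf (PySem.Str.lower substr).toList (PySem.Str.lower line).toList).map (· + (0 : Int))
        = posOf (PySem.Str.lower substr).toList (PySem.Str.lower line).toList := hmap0
    rw [hmap0'] at hfold
    simp only [hr, hparts, PySem.Str.len_eq]
    by_cases hpos : (posOf (PySem.Str.lower substr).toList (PySem.Str.lower line).toList).length > 0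
    · have hA : (0 : Int) < ((posOf (PySem.Str.lower substr).toList (PySem.Str.lower line).toList).length : Int) := by
        exact_mod_cast hpos
      have hB : (findSplit (PySem.Str.lower substr).toList (PySem.Str.lower line).toList).length > 1 := by
        omega
      rw [if_pos hA, if_pos hB]
      rw [ih, hfold, hplen]
      have hc : ((((posOf (PySem.Str.lower substr).toList (PySem.Str.lower line).toList).length + 1 : Nat)) : Int) - 1
          = ((posOf (PySem.Str.lower substr).toList (PySem.Str.lower line).toList).length : Int) := by
        push_cast; ring
      rw [hc]
      simp
    · have hA : ¬ ((0 : Int) < ((posOf (PySem.Str.lower substr).toList (PySem.Str.lower line).toList).length : Int)) := by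
        simp only [not_lt]
        exact_mod_cast Nat.le_of_not_lt hpos
      have hB : ¬ ((findSplit (PySem.Str.lower substr).toList (PySem.Str.lower line).toList).length > 1) := by
        omega
      rw [if_neg hA, if_neg hB]
      exact ih res (n + 1)

-- ===== VERDICT (by name: the statement is the Claim_ definition above) =====
theorem extract_data2_spec : Claim_equal_extract_data2 := by
  intro substr flines _ hpre
  unfold Spec_extract_data2 extract_data2 extract_data2_alt
  exact outer_fold substr hpre flines [] 0
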